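-- pv_equiv track=rewrite | github.com/adnane-habib/BrainnestPythonCamp | week1_advanced_hangman.py | myWordDict
-- ===== SOURCE A (Python) =====
-- def myWordDict(word):
--     myWordDict={}
--     #traversing the word to build the word characters position dictionary
--     for i, char in enumerate(word.lower()):
--         #updating the character position list
--         if char in myWordDict.keys():
--             myWordDict[char].append(i)
--         #creating the character position list
--         else:
--             myWordDict[char]=[i]
--     return myWordDict
-- ===== SOURCE B (Python) =====
-- def myWordDict(word):
--     w = word.lower()
--     # distinct characters in first-occurrence order
--     distinct = []
--     for ch in w:
--         if ch not in distinct: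
--             distinct.append(ch)
--     # for each distinct character, rescan the whole word for its positions
--     return {ch: [i for i, c in enumerate(w) if c == ch] for ch in distinct}
-- ===== Notes on version B (the rewrite author's own statement) =====
-- stated objective: alternative
-- what changed: Replaces A's single-pass accumulate-on-first-sight dict loop with computing the distinct characters first and then, per distinct character, an explicit rescanning of the whole word collecting its indices.
import Mathlib
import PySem

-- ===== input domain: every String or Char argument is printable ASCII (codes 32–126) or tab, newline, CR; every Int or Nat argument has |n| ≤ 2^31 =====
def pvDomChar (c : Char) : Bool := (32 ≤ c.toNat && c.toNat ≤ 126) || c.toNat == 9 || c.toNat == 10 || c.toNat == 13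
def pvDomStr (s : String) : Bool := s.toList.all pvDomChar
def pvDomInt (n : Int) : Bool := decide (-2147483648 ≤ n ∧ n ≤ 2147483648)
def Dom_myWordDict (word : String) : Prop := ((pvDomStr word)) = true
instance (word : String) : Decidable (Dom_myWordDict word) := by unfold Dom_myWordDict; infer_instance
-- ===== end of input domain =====

-- B replaces A's single-pass accumulate-on-first-sight dict loop by computing the distinct
-- characters first and then rescanning the whole word once per distinct character (alternative
-- decomposition, not claimed faster).

-- ===== PORT A =====
-- A: one pass over enumerate(word.lower()); append to the key's list if present, else create it.
def myWordDict (word : String) : List (String × List Int) :=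
  ((PySem.List.enumerate (PySem.Str.lower word).toList 0).foldl
    (fun d p =>
      if d.contains (String.ofList [p.2]) then
        d.modify (String.ofList [p.2]) [] (fun v => v ++ [p.1])
      else
        d.insert (String.ofList [p.2]) [p.1])
    PySem.Dict.empty).items

-- ===== PORT B =====
-- B: distinct characters in first-occurrence order, then one full scan per distinct character.
def myWordDict_alt (word : String) : List (String × List Int) :=
  let w := (PySem.Str.lower word).toList
  (PySem.List.dedup w).map (fun c =>
    (String.ofList [c],
     (PySem.List.enumerate w 0).filterMap (fun p => if p.2 = c then some p.1 else none)))

-- ===== PRECONDITION & SPEC =====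
def Spec_myWordDict (word : String) (out : List (String × List Int)) : Prop := out = myWordDict_alt word
instance (word : String) (out : List (String × List Int)) : Decidable (Spec_myWordDict word out) := by unfold Spec_myWordDict; infer_instance

-- ===== CLAIM (what is proved, stated in full; the proofs are below) =====
def Claim_equal_myWordDict : Prop := ∀ (word : String), Dom_myWordDict word → Spec_myWordDict word (myWordDict word)

-- ===== LEMMAS AND PROOFS =====

-- A's fold, recast over (key, index) pairs so the PySem grouping-loop lemmas apply
def pvPairs (w : List Char) : List (String × Int) :=
  (PySem.List.enumerate w 0).map (fun p => (String.ofList [p.2], p.1))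

def pvFold (w : List Char) : PySem.Dict String (List Int) :=
  (pvPairs w).foldl (fun d p => d.modify p.1 [] (fun v => v ++ [p.2])) PySem.Dict.empty

-- the char → singleton-string key map is injective
theorem pvKeyInj : Function.Injective (fun c : Char => String.ofList [c]) := by
  intro a b h
  have := congrArg String.toList h
  simpa using this

theorem pvBeqKey (a b : Char) : (String.ofList [a] == String.ofList [b]) = decide (a = b) := by
  by_cases h : a = b
  · simp [h]
  · simp [h]
    intro hc
    exact h (pvKeyInj hc)

-- A's branch is exactly dict.modify with default []
theorem pvStepEq :
    (fun (d : PySem.Dict String (List Int)) (p : Int × Char) =>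
      if d.contains (String.ofList [p.2]) then
        d.modify (String.ofList [p.2]) [] (fun v => v ++ [p.1])
      else
        d.insert (String.ofList [p.2]) [p.1])
    = (fun d p => d.modify (String.ofList [p.2]) [] (fun v => v ++ [p.1])) := by
  funext d p
  by_cases h : d.contains (String.ofList [p.2]) = true
  · simp [h]
  · simp only [h, Bool.false_eq_true, if_false]
    show _ = PySem.Dict.insert _ _ _
    rw [PySem.Dict.getD_of_not_contains _ _ (by simpa using h)]
    rfl

-- Set.add commutes with an injective map
theorem pvAddMap {α β : Type} [BEq α] [LawfulBEq α] [BEq β] [LawfulBEq β]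
    (f : α → β) (hf : Function.Injective f) (s : List α) (x : α) :
    PySem.Set.add (s.map f) (f x) = (PySem.Set.add s x).map f := by
  by_cases h : x ∈ s
  · simp [PySem.Set.add, PySem.Set.contains, h, List.mem_map, hf.eq_iff]
  · simp [PySem.Set.add, PySem.Set.contains, h, List.mem_map, hf.eq_iff]

-- Set.ofList distributes over an injective map
theorem pvOfListMap {α β : Type} [BEq α] [LawfulBEq α] [BEq β] [LawfulBEq β]
    (f : α → β) (hf : Function.Injective f) (l : List α) :
    PySem.Set.ofList (l.map f) = (PySem.Set.ofList l).map f := by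
  have key : ∀ (l : List α) (s : List α),
      (l.map f).foldl PySem.Set.add (s.map f) = (l.foldl PySem.Set.add s).map f := by
    intro l
    induction l with
    | nil => intro s; simp
    | cons x xs ih =>
      intro s
      simp only [List.map_cons, List.foldl_cons]
      rw [pvAddMap f hf s x, ih]
  have := key l []
  simpa [PySem.Set.ofList_eq_foldl] using this

theorem pvFilterMapEq (l : List (Int × Char)) (c : Char) :
    l.filterMap (fun p => if p.2 = c then some p.1 else none)
      = (l.filter (fun p => decide (p.2 = c))).map (·.1) := by
  induction l with
  | nil => rfl
  | cons x xs ih => by_cases h : x.2 = c <;> simp [h, ih]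

-- keys of the fold: the distinct keys in first-occurrence order
theorem pvFoldKeys (w : List Char) :
    (pvFold w).keys = PySem.Set.ofList ((pvPairs w).map Prod.fst) := by
  have h1 : (pvFold w).keys = PySem.Set.update PySem.Dict.empty.keys ((pvPairs w).map Prod.fst) :=
    PySem.Dict.keys_foldl_modify_key (pvPairs w) Prod.fst [] (fun _ p => (fun v => v ++ [p.2]))
      PySem.Dict.empty
  rw [h1]
  exact (PySem.Set.ofList_eq_foldl _).symm

theorem pvFoldNodup (w : List Char) : (pvFold w).keys.Nodup :=
  PySem.Dict.nodup_keys_foldl_modify_key (pvPairs w) Prod.fst [] (fun _ p => (fun v => v ++ [p.2]))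
    PySem.Dict.empty (by simp [PySem.Dict.keys_empty])

theorem pvFoldGetD (w : List Char) (k : String) :
    (pvFold w).getD k [] = ((pvPairs w).filter (fun p => p.1 == k)).map (·.2) := by
  have := PySem.Dict.getD_foldl_modify_append (pvPairs w) PySem.Dict.empty k
  simpa [pvFold] using this

theorem pvPairsFst (w : List Char) :
    (pvPairs w).map Prod.fst = w.map (fun c => String.ofList [c]) := by
  unfold pvPairs
  rw [List.map_map,
    show (Prod.fst ∘ fun p : Int × Char => (String.ofList [p.2], p.1))
       = (fun c => String.ofList [c]) ∘ (fun p : Int × Char => p.2) from rfl,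
    ← List.map_map, PySem.List.map_snd_enumerate]

theorem pvCore (w : List Char) :
    (pvFold w).items = (PySem.List.dedup w).map (fun c =>
      (String.ofList [c],
       (PySem.List.enumerate w 0).filterMap (fun p => if p.2 = c then some p.1 else none))) := by
  rw [PySem.Dict.items_eq_map_keys (pvFold w) (pvFoldNodup w) [],
    pvFoldKeys, pvPairsFst, pvOfListMap _ pvKeyInj, PySem.List.dedup_eq_ofList, List.map_map]
  refine List.map_congr_left ?_
  intro c _
  simp only [Function.comp]
  refine congrArg _ ?_
  rw [pvFoldGetD, pvFilterMapEq]
  unfold pvPairs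
  rw [List.filter_map, List.map_map]
  congr 1
  congr 1
  funext p
  show (String.ofList [p.2] == String.ofList [c]) = decide (p.2 = c)
  exact pvBeqKey p.2 c

theorem pvMain (word : String) : myWordDict word = myWordDict_alt word := by
  have hF : myWordDict word = (pvFold (PySem.Str.lower word).toList).items := by
    unfold myWordDict pvFold pvPairs
    rw [pvStepEq, List.foldl_map]
  rw [hF]
  exact pvCore _

-- ===== VERDICT (by name: the statement is the Claim_ definition above) =====
theorem myWordDict_spec : Claim_equal_myWordDict := by
  intro word _
  unfold Spec_myWordDict
  exact pvMain word
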